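-- pv_equiv track=rewrite | github.com/arthurdeschamps/question-generation-nus-ids | models/NQG_ASs2s/submodule/mytools.py | remove_adjacent_duplicate_grams
-- ===== SOURCE A (Python) =====
-- def remove_adjacent_duplicate_grams(sentence, n=4):
--     sentence = sentence.split()
--
--     def _helper(s, i):
--         for k in range(0, len(s)-i, 1):
--             s1 = " ".join(s[k:k+i])
--             s2 = " ".join(s[k+i:k+2*i])
--             if s1 == s2:
--                 s = s[0:k+i] + s[k+2*i:]
--         if n == i:
--             return s
--         return _helper(s, i+1)
--     return " ".join(_helper(sentence, 1))
-- ===== SOURCE B (Python) =====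
-- def remove_adjacent_duplicate_grams(sentence, n=4):
--     s = sentence.split()
--     for i in range(1, n + 1):
--         for k in range(len(s) - i):
--             if s[k:k + i] == s[k + i:k + 2 * i]:
--                 s = s[:k + i] + s[k + 2 * i:]
--     return " ".join(s)
-- ===== Notes on version B (the rewrite author's own statement) =====
-- stated objective: simpler
-- what changed: The recursive nested _helper plus per-chunk string joins is replaced by a flat doubly-nested loop over the n-gram sizes that compares the two adjacent chunks by direct list-slice equality (tokens from split() contain no spaces, so join-equality and slice-equality coincide).
import Mathlib
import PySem

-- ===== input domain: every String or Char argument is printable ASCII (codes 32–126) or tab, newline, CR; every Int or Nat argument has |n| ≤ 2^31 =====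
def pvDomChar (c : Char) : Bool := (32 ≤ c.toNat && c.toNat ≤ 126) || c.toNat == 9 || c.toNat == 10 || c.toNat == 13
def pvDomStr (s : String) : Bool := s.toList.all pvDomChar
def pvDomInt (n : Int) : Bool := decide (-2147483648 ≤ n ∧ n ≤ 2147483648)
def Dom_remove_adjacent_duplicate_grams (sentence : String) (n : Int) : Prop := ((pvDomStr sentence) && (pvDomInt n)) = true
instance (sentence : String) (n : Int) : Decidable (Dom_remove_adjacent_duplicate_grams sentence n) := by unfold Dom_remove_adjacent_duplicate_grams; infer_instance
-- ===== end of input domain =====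

-- B replaces A's recursive nested `_helper` (which joins chunks into strings to compare them)
-- by a flat iterative double loop comparing token slices directly; objective: simpler.


-- ===== PORT A =====
-- the body of A's inner `for k in range(0, len(s)-i, 1)` loop (range bound captured before mutation)
def pvInnerA (i : Int) (s0 : List String) : List String :=
  (PySem.List.pyRange 0 ((s0.length : Int) - i) 1).foldl (fun s k =>
    let s1 := PySem.Str.join " " (PySem.List.slice s (some k) (some (k + i)))
    let s2 := PySem.Str.join " " (PySem.List.slice s (some (k + i)) (some (k + 2 * i)))
    if s1 = s2 then PySem.List.slice s (some 0) (some (k + i)) ++ PySem.List.slice s (some (k + 2 * i)) none else s) s0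

-- A's recursive `_helper`; fuel bounds the recursion depth (for n < i CPython's unbounded
-- recursion raises RecursionError, excluded by Pre_; fuel = (n-1).toNat is exact for 1 ≤ n)
def pvHelperA (n : Int) (fuel : Nat) (s : List String) (i : Int) : List String :=
  let s' := pvInnerA i s
  if n = i then s'
  else match fuel with
    | 0 => s'
    | fuel' + 1 => pvHelperA n fuel' s' (i + 1)

def remove_adjacent_duplicate_grams (sentence : String) (n : Int) : String :=
  PySem.Str.join " " (pvHelperA n (n - 1).toNat (PySem.Str.split₀ sentence) 1)

-- ===== PORT B =====
-- B's inner `for k in range(len(s) - i)` loop: direct slice comparison, no joined strings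
def pvInnerB (i : Int) (s0 : List String) : List String :=
  (PySem.List.pyRange 0 ((s0.length : Int) - i) 1).foldl (fun s k =>
    if PySem.List.slice s (some k) (some (k + i)) = PySem.List.slice s (some (k + i)) (some (k + 2 * i))
    then PySem.List.slice s none (some (k + i)) ++ PySem.List.slice s (some (k + 2 * i)) none else s) s0

def remove_adjacent_duplicate_grams_alt (sentence : String) (n : Int) : String :=
  PySem.Str.join " " ((PySem.List.pyRange 1 (n + 1) 1).foldl (fun s i => pvInnerB i s) (PySem.Str.split₀ sentence))

-- ===== PRECONDITION & SPEC =====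
-- For n ≤ 0 A's `_helper` never reaches `n == i` and recurses forever (RecursionError);
-- those inputs are excluded, B there simply returns the whitespace-normalised sentence.
def Pre_remove_adjacent_duplicate_grams (sentence : String) (n : Int) : Prop := 1 ≤ n
instance (sentence : String) (n : Int) : Decidable (Pre_remove_adjacent_duplicate_grams sentence n) := by unfold Pre_remove_adjacent_duplicate_grams; infer_instance
def pvWitness_remove_adjacent_duplicate_grams : String × Int := ("b b a a b", 2)

def Spec_remove_adjacent_duplicate_grams (sentence : String) (n : Int) (out : String) : Prop := out = remove_adjacent_duplicate_grams_alt sentence n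
instance (sentence : String) (n : Int) (out : String) : Decidable (Spec_remove_adjacent_duplicate_grams sentence n out) := by unfold Spec_remove_adjacent_duplicate_grams; infer_instance

-- ===== CLAIM (what is proved, stated in full; the proofs are below) =====
def Claim_equal_remove_adjacent_duplicate_grams : Prop := ∀ (sentence : String) (n : Int), Dom_remove_adjacent_duplicate_grams sentence n → Pre_remove_adjacent_duplicate_grams sentence n → Spec_remove_adjacent_duplicate_grams sentence n (remove_adjacent_duplicate_grams sentence n)

-- ===== LEMMAS AND PROOFS =====

-- a token as produced by str.split(): nonempty and whitespace-free
def pvTok (t : List Char) : Prop := t ≠ [] ∧ ∀ c ∈ t, PySem.Chars.isspace c = false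
def pvInv (s : List String) : Prop := ∀ t ∈ s, pvTok t.toList

theorem pvGoInv (cs : List Char) : ∀ (cur : List Char) (acc : List (List Char)),
    (∀ c ∈ cur, PySem.Chars.isspace c = false) → (∀ t ∈ acc, pvTok t) →
    ∀ t ∈ PySem.Chars.split₀.go cs cur acc, pvTok t := by
  induction cs with
  | nil =>
    intro cur acc hcur hacc t ht
    rw [PySem.Chars.split₀.go] at ht
    by_cases hc : cur.isEmpty
    · simp [hc] at ht
      exact hacc t ht
    · simp [hc] at ht
      rcases ht with ht | ht
      · exact hacc t ht
      · subst ht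
        constructor
        · simp [List.isEmpty_iff] at hc
          simpa using hc
        · intro c hc'
          exact hcur c (List.mem_reverse.mp hc')
  | cons c rest ih =>
    intro cur acc hcur hacc t ht
    rw [PySem.Chars.split₀.go] at ht
    by_cases hs : PySem.Chars.isspace c
    · by_cases hc : cur.isEmpty
      · simp only [hs, hc, if_true] at ht
        exact ih [] acc (by simp) hacc t ht
      · simp only [hs, hc, if_true] at ht
        refine ih [] _ (by simp) ?_ t ht
        intro u hu
        rcases List.mem_cons.mp hu with hu | hu
        · subst hu
          constructor
          · simp [List.isEmpty_iff] at hc; simpa using hc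
          · intro d hd; exact hcur d (List.mem_reverse.mp hd)
        · exact hacc u hu
    · simp only [hs] at ht
      refine ih (c :: cur) acc ?_ hacc t ht
      intro d hd
      rcases List.mem_cons.mp hd with hd | hd
      · subst hd; simpa using hs
      · exact hcur d hd

theorem pvInvSplit (s : String) : pvInv (PySem.Str.split₀ s) := by
  intro t ht
  unfold PySem.Str.split₀ at ht
  rcases List.mem_map.mp ht with ⟨u, hu, rfl⟩
  have := pvGoInv s.toList [] [] (by simp) (by simp) u hu
  simpa using this

theorem pvPrefixDet : ∀ (x y r r' : List Char), (∀ c ∈ x, c ≠ ' ') → (∀ c ∈ y, c ≠ ' ') →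
    (r = [] ∨ ∃ u, r = ' ' :: u) → (r' = [] ∨ ∃ u, r' = ' ' :: u) →
    x ++ r = y ++ r' → x = y ∧ r = r' := by
  intro x
  induction x with
  | nil =>
    intro y r r' _ hy hr hr' h
    cases y with
    | nil => simpa using h
    | cons d y' =>
      exfalso
      simp at h
      rcases hr with rfl | ⟨u, rfl⟩
      · simp at h
      · have : d ≠ ' ' := hy d (by simp)
        simp at h
        exact this h.1.symm
  | cons c x' ih =>
    intro y r r' hx hy hr hr' h
    cases y with
    | nil =>
      exfalso
      simp at h
      rcases hr' with rfl | ⟨u, rfl⟩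
      · simp at h
      · have : c ≠ ' ' := hx c (by simp)
        simp at h
        exact this h.1
    | cons d y' =>
      simp only [List.cons_append, List.cons_eq_cons] at h
      obtain ⟨rfl, h2⟩ := h
      obtain ⟨h3, h4⟩ := ih y' r r' (fun e he => hx e (by simp [he])) (fun e he => hy e (by simp [he])) hr hr' h2
      exact ⟨by rw [h3], h4⟩

theorem pvJoinInj : ∀ (a b : List (List Char)), (∀ t ∈ a, pvTok t) → (∀ t ∈ b, pvTok t) →
    PySem.Chars.join [' '] a = PySem.Chars.join [' '] b → a = b := by
  intro a
  induction a with
  | nil =>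
    intro b _ hb h
    cases b with
    | nil => rfl
    | cons y bs =>
      exfalso
      rw [PySem.Chars.join_nil] at h
      have hy := hb y (by simp)
      cases bs with
      | nil => rw [PySem.Chars.join_singleton] at h; exact hy.1 h.symm
      | cons z bs' =>
        rw [PySem.Chars.join_cons_cons] at h
        rcases y with _ | ⟨e, y'⟩
        · exact hy.1 rfl
        · simp at h
  | cons x as ih =>
    intro b hb hb' h
    cases b with
    | nil =>
      exfalso
      rw [PySem.Chars.join_nil] at h
      have hx := hb x (by simp)
      cases as with
      | nil => rw [PySem.Chars.join_singleton] at h; exact hx.1 h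
      | cons z as' =>
        rw [PySem.Chars.join_cons_cons] at h
        rcases x with _ | ⟨e, x'⟩
        · exact hx.1 rfl
        · simp at h
    | cons y bs =>
      have hxs : ∀ c ∈ x, c ≠ ' ' := by
        intro c hc heq
        have := (hb x (by simp)).2 c hc
        rw [heq] at this
        simp [PySem.Chars.isspace] at this
      have hys : ∀ c ∈ y, c ≠ ' ' := by
        intro c hc heq
        have := (hb' y (by simp)).2 c hc
        rw [heq] at this
        simp [PySem.Chars.isspace] at this
      cases as with
      | nil =>
        cases bs with
        | nil =>
          rw [PySem.Chars.join_singleton, PySem.Chars.join_singleton] at h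
          rw [h]
        | cons z bs' =>
          exfalso
          rw [PySem.Chars.join_singleton, PySem.Chars.join_cons_cons] at h
          have := pvPrefixDet x y [] (' ' :: PySem.Chars.join [' '] (z :: bs')) hxs hys (Or.inl rfl) (Or.inr ⟨_, rfl⟩) (by simpa using h)
          simp at this
      | cons w as' =>
        cases bs with
        | nil =>
          exfalso
          rw [PySem.Chars.join_cons_cons, PySem.Chars.join_singleton] at h
          have := pvPrefixDet x y (' ' :: PySem.Chars.join [' '] (w :: as')) [] hxs hys (Or.inr ⟨_, rfl⟩) (Or.inl rfl) (by simpa using h)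
          simp at this
        | cons z bs' =>
          rw [PySem.Chars.join_cons_cons, PySem.Chars.join_cons_cons] at h
          have hd := pvPrefixDet x y (' ' :: PySem.Chars.join [' '] (w :: as')) (' ' :: PySem.Chars.join [' '] (z :: bs')) hxs hys (Or.inr ⟨_, rfl⟩) (Or.inr ⟨_, rfl⟩) (by simpa using h)
          obtain ⟨rfl, hr⟩ := hd
          have : PySem.Chars.join [' '] (w :: as') = PySem.Chars.join [' '] (z :: bs') := by
            simpa using hr
          rw [ih (z :: bs') (fun t ht => hb t (by simp [List.mem_cons.mp ht])) (fun t ht => hb' t (by simp [List.mem_cons.mp ht])) this]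

theorem pvStrJoinInj (a b : List String) (ha : pvInv a) (hb : pvInv b) :
    (PySem.Str.join " " a = PySem.Str.join " " b) ↔ a = b := by
  constructor
  · intro h
    unfold PySem.Str.join at h
    have h2 : PySem.Chars.join " ".toList (a.map String.toList) = PySem.Chars.join " ".toList (b.map String.toList) := by
      have := congrArg String.toList h
      simpa using this
    have h3 := pvJoinInj (a.map String.toList) (b.map String.toList)
      (by intro t ht; rcases List.mem_map.mp ht with ⟨u, hu, rfl⟩; exact ha u hu)
      (by intro t ht; rcases List.mem_map.mp ht with ⟨u, hu, rfl⟩; exact hb u hu)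
      (by simpa using h2)
    have : Function.Injective String.toList := by
      intro u v huv
      have := congrArg String.ofList huv
      simpa using this
    exact List.map_injective_iff.mpr this h3
  · intro h; rw [h]

theorem pvMemSlice {α : Type} {x : α} {s : List α} {a b : Option Int}
    (h : x ∈ PySem.List.slice s a b) : x ∈ s := by
  unfold PySem.List.slice at h
  exact List.mem_of_mem_drop (List.mem_of_mem_take h)

theorem pvSliceZero {α : Type} (s : List α) (b : Option Int) :
    PySem.List.slice s (some 0) b = PySem.List.slice s none b := by
  simp [PySem.List.slice, PySem.List.clampIdx]

theorem pvInvSlice (s : List String) (a b : Option Int) (h : pvInv s) :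
    pvInv (PySem.List.slice s a b) := fun t ht => h t (pvMemSlice ht)

theorem pvInnerEq (i : Int) (s : List String) (h : pvInv s) :
    pvInnerA i s = pvInnerB i s ∧ pvInv (pvInnerB i s) := by
  unfold pvInnerA pvInnerB
  generalize PySem.List.pyRange 0 ((s.length : Int) - i) 1 = l
  induction l generalizing s with
  | nil => exact ⟨rfl, h⟩
  | cons k l ih =>
    simp only [List.foldl_cons]
    have hcond : (PySem.Str.join " " (PySem.List.slice s (some k) (some (k + i))) =
        PySem.Str.join " " (PySem.List.slice s (some (k + i)) (some (k + 2 * i)))) ↔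
        (PySem.List.slice s (some k) (some (k + i)) = PySem.List.slice s (some (k + i)) (some (k + 2 * i))) :=
      pvStrJoinInj _ _ (pvInvSlice s _ _ h) (pvInvSlice s _ _ h)
    have hstep : (let s1 := PySem.Str.join " " (PySem.List.slice s (some k) (some (k + i)))
        let s2 := PySem.Str.join " " (PySem.List.slice s (some (k + i)) (some (k + 2 * i)))
        if s1 = s2 then PySem.List.slice s (some 0) (some (k + i)) ++ PySem.List.slice s (some (k + 2 * i)) none else s) =
        (if PySem.List.slice s (some k) (some (k + i)) = PySem.List.slice s (some (k + i)) (some (k + 2 * i))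
         then PySem.List.slice s none (some (k + i)) ++ PySem.List.slice s (some (k + 2 * i)) none else s) := by
      by_cases hc : PySem.List.slice s (some k) (some (k + i)) = PySem.List.slice s (some (k + i)) (some (k + 2 * i))
      · rw [if_pos (hcond.mpr hc), if_pos hc, pvSliceZero]
      · rw [if_neg (fun hh => hc (hcond.mp hh)), if_neg hc]
    rw [hstep]
    apply ih
    intro t ht
    by_cases hc : PySem.List.slice s (some k) (some (k + i)) = PySem.List.slice s (some (k + i)) (some (k + 2 * i))
    · rw [if_pos hc] at ht
      rcases List.mem_append.mp ht with ht | ht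
      · exact h t (pvMemSlice ht)
      · exact h t (pvMemSlice ht)
    · rw [if_neg hc] at ht
      exact h t ht

theorem pvHelperEq (n : Int) : ∀ (fuel : Nat) (i : Int) (s : List String), pvInv s →
    n = i + fuel →
    pvHelperA n fuel s i = (PySem.List.pyRange i (n + 1) 1).foldl (fun s i => pvInnerB i s) s := by
  intro fuel
  induction fuel with
  | zero =>
    intro i s h hn
    have hni : n = i := by omega
    rw [hni, PySem.List.pyRange_one_singleton]
    simp only [List.foldl_cons, List.foldl_nil]
    unfold pvHelperA
    simp only [if_pos]
    exact (pvInnerEq i s h).1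
  | succ f ih =>
    intro i s h hn
    have hne : n ≠ i := by omega
    have hlt : i < n + 1 := by omega
    rw [PySem.List.pyRange_one_cons hlt]
    simp only [List.foldl_cons]
    unfold pvHelperA
    simp only [if_neg hne]
    rw [(pvInnerEq i s h).1]
    exact ih (i + 1) _ (pvInnerEq i s h).2 (by omega)

-- ===== VERDICT (by name: the statement is the Claim_ definition above) =====
theorem remove_adjacent_duplicate_grams_spec : Claim_equal_remove_adjacent_duplicate_grams := by
  intro sentence n _ hpre
  have h1 : 1 ≤ n := hpre
  unfold Spec_remove_adjacent_duplicate_grams remove_adjacent_duplicate_grams remove_adjacent_duplicate_grams_alt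
  rw [pvHelperEq n ((n - 1).toNat) 1 _ (pvInvSplit sentence) (by omega)]
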